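-- pv_equiv track=rewrite | github.com/alexKleider/sql | code/old_member.py | replace_with_in
-- ===== SOURCE A (Python) =====
-- def replace_with_in(s, rl, l):
--     """
--     <s> is a string
--     <rl> & <l> are iterables containing strings
--     A list is returned.
--     Each item of l is examined and
--         if it contains <s>
--             <rl> is added to the returned list
--         else the item itself is added to the returned list
--     which is returned sorted with no duplicates.
--     Used in utils to expand 'appl' and 'exec' into included stati.
--     ## TO DO: Might be better to bring the detail from where it's
--     ## used back to here.
--     """
--     ret = []
--     for item in set(l):
--         if s in item:
--             ret.extend(rl)
--         else:
--             ret.append(item)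
--     return sorted(set(ret))
-- ===== SOURCE B (Python) =====
-- def replace_with_in(s, rl, l):
--     # One pass partitions l into a match flag and the non-matching items (no sets);
--     # sort the candidates and remove duplicates by comparing adjacent elements.
--     matched = False
--     cand = []
--     for item in l:
--         if s in item:
--             matched = True
--         else:
--             cand.append(item)
--     if matched:
--         cand.extend(rl)
--     cand.sort()
--     out = []
--     prev = None
--     for x in cand:
--         if x != prev:
--             out.append(x)
--             prev = x
--     return out
-- ===== Notes on version B (the rewrite author's own statement) =====
-- stated objective: alternative
-- what changed: Removes all set usage: one pass over l yields a match flag and the non-matching items, rl is appended once if the flag is set, and duplicates are eliminated by sorting and a linear adjacent-comparison scan instead of hashing into sets.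
import Mathlib
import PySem

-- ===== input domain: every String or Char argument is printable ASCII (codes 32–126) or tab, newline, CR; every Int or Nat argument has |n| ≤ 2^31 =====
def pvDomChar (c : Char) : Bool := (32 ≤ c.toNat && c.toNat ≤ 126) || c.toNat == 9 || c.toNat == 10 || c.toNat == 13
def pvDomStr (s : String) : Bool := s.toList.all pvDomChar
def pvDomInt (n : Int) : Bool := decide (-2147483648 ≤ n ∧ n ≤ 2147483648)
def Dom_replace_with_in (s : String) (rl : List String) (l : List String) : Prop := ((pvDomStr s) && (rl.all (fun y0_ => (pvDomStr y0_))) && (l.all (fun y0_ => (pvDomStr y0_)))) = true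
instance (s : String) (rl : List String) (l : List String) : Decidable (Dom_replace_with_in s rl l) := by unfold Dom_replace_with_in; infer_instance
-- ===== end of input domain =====

-- B removes all set usage: one flag-and-filter pass, append rl once, then sort and
-- drop duplicates by an adjacent-comparison scan (alternative algorithm, same cost).

-- ===== PORT A =====
-- Port of A: iterate over set(l) (PySem.Set.ofList, first-occurrence order; the final
-- sorted(set(...)) makes the result independent of Python's set iteration order),
-- extending with rl on a match else appending the item, then sorted(set(ret)).
def replace_with_in (s : String) (rl : List String) (l : List String) : List String :=
  let ret : List String :=
    (PySem.Set.ofList l).foldl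
      (fun ret item => if PySem.Str.isIn s item then ret ++ rl else ret ++ [item]) []
  PySem.List.sorted (PySem.Set.ofList ret) (fun x => x) false

-- ===== PORT B =====
-- Port of B: one pass accumulating (matched, cand) over l, conditional extend by rl,
-- sort, then the prev/out loop keeping each element that differs from its predecessor.
def replace_with_in_alt (s : String) (rl : List String) (l : List String) : List String :=
  let st : Bool × List String :=
    l.foldl (fun st item =>
      if PySem.Str.isIn s item then (true, st.2) else (st.1, st.2 ++ [item])) (false, [])
  let cand : List String := if st.1 then st.2 ++ rl else st.2
  let cand : List String := PySem.List.sorted cand (fun x => x) false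
  (cand.foldl (fun (st : List String × Option String) x =>
      if some x ≠ st.2 then (st.1 ++ [x], some x) else st) ([], none)).1

-- ===== PRECONDITION & SPEC =====
def Spec_replace_with_in (s : String) (rl : List String) (l : List String) (out : List String) : Prop := out = replace_with_in_alt s rl l
instance (s : String) (rl : List String) (l : List String) (out : List String) : Decidable (Spec_replace_with_in s rl l out) := by unfold Spec_replace_with_in; infer_instance

-- ===== CLAIM (what is proved, stated in full; the proofs are below) =====
def Claim_equal_replace_with_in : Prop := ∀ (s : String) (rl : List String) (l : List String), Dom_replace_with_in s rl l → Spec_replace_with_in s rl l (replace_with_in s rl l)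

-- ===== LEMMAS AND PROOFS =====

-- Membership characterisation of A's accumulated list ret (p abstracts the match test).
theorem pv_mem_ret (p : String → Bool) (rl l : List String) (x : String) :
    (x ∈ (PySem.Set.ofList l).foldl
      (fun ret item => if p item then ret ++ rl else ret ++ [item]) []) ↔
    (∃ a ∈ l, if p a then x ∈ rl else x = a) := by
  have hf : (fun (ret : List String) item =>
      if p item then ret ++ rl else ret ++ [item]) =
      (fun ret item => ret ++ (if p item then rl else [item])) := by
    funext ret item; split <;> rfl
  rw [hf, PySem.List.foldl_append_eq_flatMap]
  simp only [List.nil_append, List.mem_flatMap, PySem.Set.mem_ofList]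
  constructor
  · rintro ⟨a, ha, hx⟩
    refine ⟨a, ha, ?_⟩
    by_cases h : p a
    · rw [if_pos h] at hx ⊢; exact hx
    · rw [if_neg h] at hx ⊢; simpa using hx
  · rintro ⟨a, ha, hx⟩
    refine ⟨a, ha, ?_⟩
    by_cases h : p a
    · rw [if_pos h] at hx ⊢; exact hx
    · rw [if_neg h] at hx ⊢; simp [hx]

-- B's first loop IS (flag-or-any, filtered list).
theorem pv_partition_foldl (p : String → Bool) (l : List String) (b : Bool) (acc : List String) :
    l.foldl (fun (st : Bool × List String) item =>
      if p item then (true, st.2) else (st.1, st.2 ++ [item])) (b, acc) =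
    (b || l.any p, acc ++ l.filter (fun x => !p x)) := by
  induction l generalizing b acc with
  | nil => simp
  | cons x xs ih =>
    simp only [List.foldl_cons]
    by_cases h : p x
    · simp [h, ih]
    · simp [h, ih]

-- Recursive form of B's dedup loop.
def pvDedup (prev : Option String) : List String → List String
  | [] => []
  | x :: xs => if some x ≠ prev then x :: pvDedup (some x) xs else pvDedup prev xs

theorem pv_dedup_foldl (c : List String) (acc : List String) (prev : Option String) :
    (c.foldl (fun (st : List String × Option String) x =>
      if some x ≠ st.2 then (st.1 ++ [x], some x) else st) (acc, prev)).1 =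
    acc ++ pvDedup prev c := by
  induction c generalizing acc prev with
  | nil => simp [pvDedup]
  | cons x xs ih =>
    simp only [List.foldl_cons, pvDedup]
    by_cases h : some x ≠ prev
    · rw [if_pos h, if_pos h, ih]; simp
    · rw [if_neg h, if_neg h, ih]

-- On a ≤-sorted suffix whose elements all dominate prev, adjacent dedup keeps
-- exactly the elements other than prev, strictly increasing.
theorem pv_dedup_spec (c : List String) (prev : Option String)
    (hs : c.Pairwise (· ≤ ·)) (hp : ∀ p, prev = some p → ∀ y ∈ c, p ≤ y) :
    (∀ x, x ∈ pvDedup prev c ↔ x ∈ c ∧ some x ≠ prev) ∧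
    (pvDedup prev c).Pairwise (· < ·) := by
  induction c generalizing prev with
  | nil => simp [pvDedup]
  | cons x xs ih =>
    rcases List.pairwise_cons.mp hs with ⟨hx, hxs⟩
    by_cases h : some x ≠ prev
    · have ih' := ih (some x) hxs (by rintro p hp' y hy; cases hp'; exact hx y hy)
      constructor
      · intro y
        simp only [pvDedup, if_pos h, List.mem_cons, ih'.1]
        constructor
        · rintro (rfl | ⟨hy, hne⟩)
          · exact ⟨Or.inl rfl, h⟩
          · refine ⟨Or.inr hy, ?_⟩
            intro heq
            have h1 : y ≤ x := hp y heq.symm x (List.mem_cons_self)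
            have h2 : x ≤ y := hx y hy
            exact h (by rw [le_antisymm h2 h1]; exact heq)
        · rintro ⟨(rfl | hy), hne⟩
          · exact Or.inl rfl
          · by_cases hxy : y = x
            · exact Or.inl hxy
            · exact Or.inr ⟨hy, by simpa using hxy⟩
      · simp only [pvDedup, if_pos h]
        refine List.pairwise_cons.mpr ⟨?_, ih'.2⟩
        intro y hy
        rcases (ih'.1 y).mp hy with ⟨hyx, hne⟩
        exact lt_of_le_of_ne (hx y hyx) (by rintro rfl; exact hne rfl)
    · push Not at h
      subst h
      have ih' := ih (some x) hxs (by rintro q hq y hy; cases hq; exact hx y hy)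
      have hrw : pvDedup (some x) (x :: xs) = pvDedup (some x) xs := by
        simp [pvDedup]
      rw [hrw]
      refine ⟨?_, ih'.2⟩
      intro y
      rw [ih'.1]
      simp only [List.mem_cons]
      constructor
      · rintro ⟨hy, hne⟩; exact ⟨Or.inr hy, hne⟩
      · rintro ⟨(rfl | hy), hne⟩
        · exact absurd rfl hne
        · exact ⟨hy, hne⟩

-- Membership in B's candidate list matches membership in A's ret.
theorem pv_mem_cand (s : String) (rl l : List String) (x : String) :
    (x ∈ (if l.any (fun item => PySem.Str.isIn s item)
            then l.filter (fun item => !PySem.Str.isIn s item) ++ rl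
            else l.filter (fun item => !PySem.Str.isIn s item))) ↔
    (∃ a ∈ l, if PySem.Str.isIn s a then x ∈ rl else x = a) := by
  by_cases hany : l.any (fun item => PySem.Str.isIn s item) = true
  · rw [if_pos hany]
    rw [List.any_eq_true] at hany
    obtain ⟨w, hw, hws⟩ := hany
    simp only [List.mem_append, List.mem_filter, Bool.not_eq_eq_eq_not, Bool.not_true]
    constructor
    · rintro (⟨hx, hnx⟩ | hx)
      · exact ⟨x, hx, by rw [if_neg (by rw [hnx]; simp)]⟩
      · exact ⟨w, hw, by rw [if_pos hws]; exact hx⟩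
    · rintro ⟨a, ha, hx⟩
      by_cases h : PySem.Str.isIn s a = true
      · rw [if_pos h] at hx; exact Or.inr hx
      · rw [if_neg h] at hx; subst hx
        exact Or.inl ⟨ha, Bool.eq_false_iff.mpr h⟩
  · rw [if_neg hany]
    rw [List.any_eq_true] at hany
    push Not at hany
    simp only [List.mem_filter, Bool.not_eq_eq_eq_not, Bool.not_true]
    constructor
    · rintro ⟨hx, hnx⟩
      exact ⟨x, hx, by rw [if_neg (by rw [hnx]; simp)]⟩
    · rintro ⟨a, ha, hx⟩
      have h := hany a ha
      rw [if_neg h] at hx; subst hx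
      exact ⟨ha, Bool.eq_false_iff.mpr h⟩

-- ===== VERDICT (by name: the statement is the Claim_ definition above) =====
theorem replace_with_in_spec : Claim_equal_replace_with_in := by
  intro s rl l _
  unfold Spec_replace_with_in replace_with_in replace_with_in_alt
  rw [pv_partition_foldl]
  simp only [Bool.false_or, List.nil_append]
  rw [pv_dedup_foldl]
  simp only [List.nil_append]
  have hsort : (PySem.List.sorted
      (if l.any (fun item => PySem.Str.isIn s item)
        then l.filter (fun item => !PySem.Str.isIn s item) ++ rl
        else l.filter (fun item => !PySem.Str.isIn s item)) (fun x => x) false).Pairwise (· ≤ ·) := by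
    simpa using PySem.List.sorted_pairwise _ (fun x : String => x)
  have hded := pv_dedup_spec _ none hsort (by rintro p hp; cases hp)
  apply PySem.List.sorted_eq_of_perm_of_pairwise_lt _ _ _ ?_ hded.2
  apply (List.perm_ext_iff_of_nodup (hded.2.imp fun h => ne_of_lt h)
    (PySem.Set.nodup_ofList _)).mpr
  intro x
  rw [hded.1]
  simp only [ne_eq, reduceCtorEq, not_false_eq_true, and_true, PySem.List.mem_sorted,
    PySem.Set.mem_ofList]
  rw [pv_mem_ret]
  exact pv_mem_cand s rl l x
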